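-- pv_equiv track=rewrite | github.com/Brighter-bits/AdventOfCode2025 | Day4.py | Pass
-- ===== SOURCE A (Python) =====
-- Dirs = ([-1, -1], [0, -1], [1, -1], [-1, 0], [1, 0], [-1, 1], [0, 1], [1, 1]) # 0, 0 is the roll itself and so is not included in the list
--
-- def Add(grid, x, y):
--     for dir in Dirs:
--         try:
--             newY = y + dir[0] if y + dir[0] >= 0 else None
--             newX = x + dir[1] if x + dir[1] >= 0 else None
--             grid[newY][newX] += 1
--         except:
--             continue
--     return grid
--
-- def Pass(inp):
--     numgrid = [[0 for i in range(len(inp[0]))] for b in range(len(inp))]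
--     rollCoords = []
--     for x in range(len(inp[0])):
--         for y in range(len(inp)):
--             if inp[y][x] == "@":
--                 rollCoords.append((x, y))
--                 numgrid = Add(numgrid, x, y)
--     return numgrid, rollCoords
-- ===== SOURCE B (Python) =====
-- Dirs = ([-1, -1], [0, -1], [1, -1], [-1, 0], [1, 0], [-1, 1], [0, 1], [1, 1])
--
-- def Pass(inp):
--     h = len(inp)
--     w = len(inp[0])
--     rollCoords = [(x, y) for x in range(w) for y in range(h) if inp[y][x] == "@"]
--     rollSet = set(rollCoords)
--     numgrid = [[sum(1 for dy, dx in Dirs if (X + dx, Y + dy) in rollSet)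
--                 for X in range(w)]
--                for Y in range(h)]
--     return numgrid, rollCoords
-- ===== Notes on version B (the rewrite author's own statement) =====
-- stated objective: alternative
-- what changed: B reverses the data flow: instead of scattering eight guarded increments from every '@' into a mutable grid (A's Add with try/except), B builds the roll list once, puts it in a set, and gathers each cell's value by counting which of the 8 neighbour offsets hits a roll; the symmetric direction set makes the two equal.
import Mathlib
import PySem

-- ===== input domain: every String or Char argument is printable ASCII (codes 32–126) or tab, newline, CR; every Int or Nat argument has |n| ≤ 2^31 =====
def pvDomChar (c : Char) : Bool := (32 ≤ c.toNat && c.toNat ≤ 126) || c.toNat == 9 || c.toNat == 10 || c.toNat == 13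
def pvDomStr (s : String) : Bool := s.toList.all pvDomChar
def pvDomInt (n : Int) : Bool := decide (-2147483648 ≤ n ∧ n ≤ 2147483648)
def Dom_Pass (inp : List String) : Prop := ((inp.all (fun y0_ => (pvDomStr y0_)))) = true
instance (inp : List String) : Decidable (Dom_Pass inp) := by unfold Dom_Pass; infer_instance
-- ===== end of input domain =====

-- B gathers each cell's count from a set of roll coordinates instead of scattering
-- increments from each roll (objective: alternative decomposition, same cost class).

-- ===== PORT A =====
def pvDirs : List (Int × Int) := [(-1,-1),(0,-1),(1,-1),(-1,0),(1,0),(-1,1),(0,1),(1,1)]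

-- one 'grid[newY][newX] += 1' attempt: the try/except skips negative (None index,
-- TypeError) and out-of-range (IndexError) targets, i.e. exactly the guard below
def pvBump (g : List (List Int)) (ny nx : Int) : List (List Int) :=
  if 0 ≤ ny ∧ 0 ≤ nx ∧ ny.toNat < g.length ∧ nx.toNat < (g.getD ny.toNat []).length then
    g.modify ny.toNat (fun row => row.modify nx.toNat (· + 1))
  else g

def pvAdd (g : List (List Int)) (x y : Int) : List (List Int) :=
  pvDirs.foldl (fun acc d => pvBump acc (y + d.1) (x + d.2)) g

def Pass (inp : List String) : List (List Int) × (List (Int × Int)) :=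
  let rows := inp.map String.toList
  let h := rows.length
  let w := (rows.headD []).length
  let init : List (List Int) := List.replicate h (List.replicate w 0)
  (List.range w).foldl (fun st x =>
    (List.range h).foldl (fun (st : List (List Int) × List (Int × Int)) y =>
      if (rows.getD y []).getD x ' ' = '@' then
        (pvAdd st.1 (x : Int) (y : Int), st.2 ++ [((x : Int), (y : Int))])
      else st) st) (init, [])

-- ===== PORT B =====
def Pass_alt (inp : List String) : List (List Int) × (List (Int × Int)) :=
  let rows := inp.map String.toList
  let h := rows.length
  let w := (rows.headD []).length
  let rollCoords : List (Int × Int) :=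
    (List.range w).flatMap (fun x =>
      (List.range h).filterMap (fun y =>
        if (rows.getD y []).getD x ' ' = '@' then some ((x : Int), (y : Int)) else none))
  let rollSet : PySem.Set (Int × Int) := PySem.Set.ofList rollCoords
  let numgrid := (List.range h).map (fun (Y : Nat) =>
    (List.range w).map (fun (X : Nat) =>
      ((pvDirs.filter (fun d =>
          PySem.Set.contains rollSet ((X : Int) + d.2, (Y : Int) + d.1))).length : Int)))
  (numgrid, rollCoords)

-- ===== PRECONDITION & SPEC =====
-- Pre_ excludes exactly the inputs where the Python A raises IndexError:
-- the empty list (inp[0]) and grids with a row shorter than the first row (inp[y][x]).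
def Pre_Pass (inp : List String) : Prop :=
  inp ≠ [] ∧ ∀ s ∈ inp, ((inp.headD "").toList).length ≤ (s.toList).length
instance (inp : List String) : Decidable (Pre_Pass inp) := by unfold Pre_Pass; infer_instance

def pvWitness_Pass : List String := ["@.", ".@", "@@"]

def Spec_Pass (inp : List String) (out : List (List Int) × (List (Int × Int))) : Prop := out = Pass_alt inp
instance (inp : List String) (out : List (List Int) × (List (Int × Int))) : Decidable (Spec_Pass inp out) := by unfold Spec_Pass; infer_instance

-- ===== CLAIM (what is proved, stated in full; the proofs are below) =====
def Claim_equal_Pass : Prop := ∀ (inp : List String), Dom_Pass inp → Pre_Pass inp → Spec_Pass inp (Pass inp)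

-- ===== LEMMAS AND PROOFS =====

-- cell value as B computes it, with plain list membership of the roll list
def pvCellVal (R : List (Int × Int)) (Y X : Nat) : Int :=
  ((pvDirs.filter (fun d => R.contains ((X : Int) + d.2, (Y : Int) + d.1))).length : Int)

def pvMkGrid (h w : Nat) (F : Nat → Nat → Int) : List (List Int) :=
  (List.range h).map (fun Y => (List.range w).map (F Y))

def pvGridOf (h w : Nat) (R : List (Int × Int)) : List (List Int) :=
  pvMkGrid h w (fun Y X => pvCellVal R Y X)

-- the (x,y) pairs of one column x, rows drawn from ys, that hold a roll
def pvCol (rows : List (List Char)) (x : Nat) (ys : List Nat) : List (Int × Int) :=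
  ys.filterMap (fun y =>
    if (rows.getD y []).getD x ' ' = '@' then some ((x : Int), (y : Int)) else none)

lemma pvMkGrid_congr (h w : Nat) (F G : Nat → Nat → Int)
    (hFG : ∀ Y < h, ∀ X < w, F Y X = G Y X) : pvMkGrid h w F = pvMkGrid h w G := by
  unfold pvMkGrid
  apply List.map_congr_left; intro Y hY
  apply List.map_congr_left; intro X hX
  exact hFG Y (List.mem_range.mp hY) X (List.mem_range.mp hX)

lemma pvBump_mkGrid (h w : Nat) (F : Nat → Nat → Int) (ny nx : Int) :
    pvBump (pvMkGrid h w F) ny nx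
      = pvMkGrid h w (fun Y X => F Y X + if ((Y : Int) = ny ∧ (X : Int) = nx) then 1 else 0) := by
  have hlen : (pvMkGrid h w F).length = h := by simp [pvMkGrid]
  by_cases hy : 0 ≤ ny ∧ ny.toNat < h
  · have hrow : (pvMkGrid h w F).getD ny.toNat [] = (List.range w).map (F ny.toNat) := by
      rw [List.getD_eq_getElem _ _ (by omega)]
      simp [pvMkGrid]
    by_cases hx : 0 ≤ nx ∧ nx.toNat < w
    · rw [pvBump, if_pos (by rw [hlen, hrow]; simp; omega)]
      apply List.ext_getElem
      · simp [pvMkGrid]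
      · intro Y h1 h2
        rw [List.getElem_modify]
        simp only [pvMkGrid, List.getElem_map, List.getElem_range]
        by_cases hyY : ny.toNat = Y
        · rw [if_pos hyY]
          apply List.ext_getElem
          · simp
          · intro X g1 g2
            rw [List.getElem_modify]
            simp only [List.getElem_map, List.getElem_range]
            by_cases hxX : nx.toNat = X
            · rw [if_pos hxX, if_pos (by omega)]
            · rw [if_neg hxX, if_neg (by omega)]; ring
        · rw [if_neg hyY]
          apply List.map_congr_left; intro X hX
          rw [if_neg (by omega)]; ring
    · rw [pvBump, if_neg (by rw [hlen, hrow]; simp; omega)]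
      exact (pvMkGrid_congr h w _ _ (fun Y hY X hX => by rw [if_neg (by omega)]; ring)).symm
  · rw [pvBump, if_neg (by rw [hlen]; omega)]
    exact (pvMkGrid_congr h w _ _ (fun Y hY X hX => by rw [if_neg (by omega)]; ring)).symm

lemma ite_or_one {A E : Prop} [Decidable A] [Decidable E] (hne : ¬(A ∧ E)) :
    (if A ∨ E then (1:ℤ) else 0) = (if A then 1 else 0) + (if E then 1 else 0) := by
  by_cases hA : A <;> by_cases hE : E <;> simp_all

-- scattering one roll into the gathered grid of R extends R by that roll
lemma pvAdd_gridOf (h w x y : Nat) (R : List (Int × Int))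
    (hR : ((x : Int), (y : Int)) ∉ R) :
    pvAdd (pvGridOf h w R) x y = pvGridOf h w (R ++ [((x : Int), (y : Int))]) := by
  unfold pvGridOf
  rw [pvAdd]
  simp only [pvDirs, List.foldl_cons, List.foldl_nil]
  simp only [pvBump_mkGrid]
  apply pvMkGrid_congr
  intro Y hY X hX
  simp only [pvCellVal, pvDirs, ← List.countP_eq_length_filter, List.countP_cons,
    List.countP_nil, List.contains_append, List.contains_cons, List.contains_nil,
    Bool.or_false, Bool.or_eq_true, beq_iff_eq, Prod.mk.injEq]
  push_cast
  have hnem : ∀ a b : Int, a = (x:Int) → b = (y:Int) → R.contains (a, b) = true → False := by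
    intro a b ha hb hc
    rw [ha, hb, List.contains_iff_mem] at hc
    exact hR hc
  rw [
    ite_or_one (A := R.contains ((X:ℤ) + 1, (Y:ℤ) + 1) = true) (E := (X:ℤ) + 1 = (x:ℤ) ∧ (Y:ℤ) + 1 = (y:ℤ)) (by rintro ⟨hc, h1, h2⟩; exact hnem _ _ h1 h2 hc),
    ite_or_one (A := R.contains ((X:ℤ) + 1, (Y:ℤ) + 0) = true) (E := (X:ℤ) + 1 = (x:ℤ) ∧ (Y:ℤ) + 0 = (y:ℤ)) (by rintro ⟨hc, h1, h2⟩; exact hnem _ _ h1 h2 hc),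
    ite_or_one (A := R.contains ((X:ℤ) + 1, (Y:ℤ) + -1) = true) (E := (X:ℤ) + 1 = (x:ℤ) ∧ (Y:ℤ) + -1 = (y:ℤ)) (by rintro ⟨hc, h1, h2⟩; exact hnem _ _ h1 h2 hc),
    ite_or_one (A := R.contains ((X:ℤ) + 0, (Y:ℤ) + 1) = true) (E := (X:ℤ) + 0 = (x:ℤ) ∧ (Y:ℤ) + 1 = (y:ℤ)) (by rintro ⟨hc, h1, h2⟩; exact hnem _ _ h1 h2 hc),
    ite_or_one (A := R.contains ((X:ℤ) + 0, (Y:ℤ) + -1) = true) (E := (X:ℤ) + 0 = (x:ℤ) ∧ (Y:ℤ) + -1 = (y:ℤ)) (by rintro ⟨hc, h1, h2⟩; exact hnem _ _ h1 h2 hc),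
    ite_or_one (A := R.contains ((X:ℤ) + -1, (Y:ℤ) + 1) = true) (E := (X:ℤ) + -1 = (x:ℤ) ∧ (Y:ℤ) + 1 = (y:ℤ)) (by rintro ⟨hc, h1, h2⟩; exact hnem _ _ h1 h2 hc),
    ite_or_one (A := R.contains ((X:ℤ) + -1, (Y:ℤ) + 0) = true) (E := (X:ℤ) + -1 = (x:ℤ) ∧ (Y:ℤ) + 0 = (y:ℤ)) (by rintro ⟨hc, h1, h2⟩; exact hnem _ _ h1 h2 hc),
    ite_or_one (A := R.contains ((X:ℤ) + -1, (Y:ℤ) + -1) = true) (E := (X:ℤ) + -1 = (x:ℤ) ∧ (Y:ℤ) + -1 = (y:ℤ)) (by rintro ⟨hc, h1, h2⟩; exact hnem _ _ h1 h2 hc)]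
  simp only [
    show ((X:ℤ) + 1 = (x:ℤ) ∧ (Y:ℤ) + 1 = (y:ℤ)) ↔ ((Y:ℤ) = (y:ℤ) + -1 ∧ (X:ℤ) = (x:ℤ) + -1) from by omega,
    show ((X:ℤ) + 1 = (x:ℤ) ∧ (Y:ℤ) + 0 = (y:ℤ)) ↔ ((Y:ℤ) = (y:ℤ) + 0 ∧ (X:ℤ) = (x:ℤ) + -1) from by omega,
    show ((X:ℤ) + 1 = (x:ℤ) ∧ (Y:ℤ) + -1 = (y:ℤ)) ↔ ((Y:ℤ) = (y:ℤ) + 1 ∧ (X:ℤ) = (x:ℤ) + -1) from by omega,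
    show ((X:ℤ) + 0 = (x:ℤ) ∧ (Y:ℤ) + 1 = (y:ℤ)) ↔ ((Y:ℤ) = (y:ℤ) + -1 ∧ (X:ℤ) = (x:ℤ) + 0) from by omega,
    show ((X:ℤ) + 0 = (x:ℤ) ∧ (Y:ℤ) + -1 = (y:ℤ)) ↔ ((Y:ℤ) = (y:ℤ) + 1 ∧ (X:ℤ) = (x:ℤ) + 0) from by omega,
    show ((X:ℤ) + -1 = (x:ℤ) ∧ (Y:ℤ) + 1 = (y:ℤ)) ↔ ((Y:ℤ) = (y:ℤ) + -1 ∧ (X:ℤ) = (x:ℤ) + 1) from by omega,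
    show ((X:ℤ) + -1 = (x:ℤ) ∧ (Y:ℤ) + 0 = (y:ℤ)) ↔ ((Y:ℤ) = (y:ℤ) + 0 ∧ (X:ℤ) = (x:ℤ) + 1) from by omega,
    show ((X:ℤ) + -1 = (x:ℤ) ∧ (Y:ℤ) + -1 = (y:ℤ)) ↔ ((Y:ℤ) = (y:ℤ) + 1 ∧ (X:ℤ) = (x:ℤ) + 1) from by omega]
  ring

-- the inner fold over the rows of one column
lemma pvInner (rows : List (List Char)) (h w x : Nat) (ys : List Nat)
    (R : List (Int × Int)) (hnd : ys.Nodup)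
    (hdisj : ∀ y ∈ ys, ((x : Int), (y : Int)) ∉ R) :
    ys.foldl (fun (st : List (List Int) × List (Int × Int)) y =>
      if (rows.getD y []).getD x ' ' = '@' then
        (pvAdd st.1 (x : Int) (y : Int), st.2 ++ [((x : Int), (y : Int))])
      else st) (pvGridOf h w R, R)
    = (pvGridOf h w (R ++ pvCol rows x ys), R ++ pvCol rows x ys) := by
  induction ys generalizing R with
  | nil => simp [pvCol]
  | cons y0 tl ih =>
    rw [List.foldl_cons]
    by_cases hP : (rows.getD y0 []).getD x ' ' = '@'
    · rw [if_pos hP]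
      have hstep := pvAdd_gridOf h w x y0 R (hdisj y0 (List.mem_cons_self))
      rw [show (pvGridOf h w R, R).1 = pvGridOf h w R from rfl,
          show (pvGridOf h w R, R).2 = R from rfl, hstep]
      have hrec := ih (R ++ [((x : Int), (y0 : Int))]) (List.Nodup.of_cons hnd)
        (by
          intro y hymem hmem
          rcases List.mem_append.mp hmem with hL | hR1
          · exact hdisj y (List.mem_cons_of_mem _ hymem) hL
          · have hyy : y = y0 := by
              have h2 : ((y : Int)) = ((y0 : Int)) :=
                congrArg Prod.snd (List.mem_singleton.mp hR1)
              exact_mod_cast h2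
            exact (List.nodup_cons.mp hnd).1 (hyy ▸ hymem))
      rw [hrec]
      unfold pvCol
      rw [List.filterMap_cons, if_pos hP, List.append_assoc]
      rfl
    · rw [if_neg hP]
      rw [ih R (List.Nodup.of_cons hnd) (fun y hy => hdisj y (List.mem_cons_of_mem _ hy))]
      unfold pvCol
      rw [List.filterMap_cons, if_neg hP]

-- membership in one column pins the first coordinate
lemma pvCol_fst (rows : List (List Char)) (x : Nat) (ys : List Nat)
    (p : Int × Int) (hp : p ∈ pvCol rows x ys) : p.1 = (x : Int) := by
  rcases List.mem_filterMap.mp hp with ⟨y, _, hy⟩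
  by_cases hP : (rows.getD y []).getD x ' ' = '@'
  · rw [if_pos hP] at hy
    cases hy
    rfl
  · rw [if_neg hP] at hy
    cases hy

-- the outer fold over the columns
lemma pvOuter (rows : List (List Char)) (h w : Nat) (xs : List Nat)
    (R : List (Int × Int)) (hnd : xs.Nodup)
    (hdisj : ∀ x ∈ xs, ∀ y : Nat, ((x : Int), (y : Int)) ∉ R) :
    xs.foldl (fun st x =>
      (List.range h).foldl (fun (st : List (List Int) × List (Int × Int)) y =>
        if (rows.getD y []).getD x ' ' = '@' then
          (pvAdd st.1 (x : Int) (y : Int), st.2 ++ [((x : Int), (y : Int))])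
        else st) st) (pvGridOf h w R, R)
    = (pvGridOf h w (R ++ xs.flatMap (fun x => pvCol rows x (List.range h))),
       R ++ xs.flatMap (fun x => pvCol rows x (List.range h))) := by
  induction xs generalizing R with
  | nil => simp
  | cons x0 tl ih =>
    rw [List.foldl_cons]
    rw [pvInner rows h w x0 (List.range h) R (List.nodup_range)
      (fun y _ => hdisj x0 List.mem_cons_self y)]
    rw [ih (R ++ pvCol rows x0 (List.range h)) (List.Nodup.of_cons hnd)
      (by
        intro x hx y hmem
        rcases List.mem_append.mp hmem with hL | hR1
        · exact hdisj x (List.mem_cons_of_mem _ hx) y hL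
        · have h1 : ((x : Int), (y : Int)).1 = (x0 : Int) := pvCol_fst rows x0 _ _ hR1
          have hxx : x = x0 := by
            have h2 : ((x : Int)) = ((x0 : Int)) := h1
            exact_mod_cast h2
          exact (List.nodup_cons.mp hnd).1 (hxx ▸ hx))]
    rw [List.flatMap_cons, ← List.append_assoc]

-- the initial all-zero grid is the gathered grid of no rolls
lemma pvGridOf_nil (h w : Nat) :
    pvGridOf h w [] = List.replicate h (List.replicate w 0) := by
  unfold pvGridOf pvMkGrid pvCellVal
  simp [List.map_const']

-- membership in a set built from the roll list is membership in the roll list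
lemma pvContains_ofList (R : List (Int × Int)) (q : Int × Int) :
    PySem.Set.contains (PySem.Set.ofList R) q = R.contains q := by
  by_cases hq : q ∈ R <;> simp [PySem.Set.mem_ofList, hq]

-- both ports, expressed over the shared row lists: the folded scatter state equals B's gathered pair
lemma pvMain (rows : List (List Char)) :
    (List.range (rows.headD []).length).foldl (fun st x =>
      (List.range rows.length).foldl (fun (st : List (List Int) × List (Int × Int)) y =>
        if (rows.getD y []).getD x ' ' = '@' then
          (pvAdd st.1 (x : Int) (y : Int), st.2 ++ [((x : Int), (y : Int))])
        else st) st)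
      (List.replicate rows.length (List.replicate (rows.headD []).length 0),
       ([] : List (Int × Int)))
    = ((List.range rows.length).map (fun (Y : Nat) =>
         (List.range (rows.headD []).length).map (fun (X : Nat) =>
           ((pvDirs.filter (fun d =>
               PySem.Set.contains
                 (PySem.Set.ofList ((List.range (rows.headD []).length).flatMap (fun x =>
                   (List.range rows.length).filterMap (fun y =>
                     if (rows.getD y []).getD x ' ' = '@' then some ((x : Int), (y : Int))
                     else none))))
                 ((X : Int) + d.2, (Y : Int) + d.1))).length : Int))),
       (List.range (rows.headD []).length).flatMap (fun x =>
         (List.range rows.length).filterMap (fun y =>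
           if (rows.getD y []).getD x ' ' = '@' then some ((x : Int), (y : Int))
           else none))) := by
  rw [← pvGridOf_nil]
  rw [pvOuter rows rows.length (rows.headD []).length
    (List.range (rows.headD []).length) [] List.nodup_range (by simp)]
  simp only [List.nil_append]
  unfold pvCol
  refine Prod.ext ?_ rfl
  unfold pvGridOf pvMkGrid pvCellVal
  simp only [pvContains_ofList]

-- ===== VERDICT (by name: the statement is the Claim_ definition above) =====
theorem Pass_spec : Claim_equal_Pass := by
  intro inp _ _
  unfold Spec_Pass Pass Pass_alt
  exact pvMain (inp.map String.toList)
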